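-- pv_equiv track=rewrite | github.com/joshanashakya/dissertation | workspace/dataset/java-python/GeeksForGeeks/3607/A/2.py | isDivisiblePalindrome
-- ===== SOURCE A (Python) =====
-- def isDivisiblePalindrome(n):
--
--     # Hash array to store frequency
--     # of digits of n
--     hash = [0] * 10
--
--     digitSum = 0
--
--     # traverse the digits of integer
--     # and store their frequency
--     while (n) :
--
--         # Calculate the sum of
--         # digits simultaneously
--         digitSum += n % 10
--         hash[n % 10] += 1
--         n //= 10
--
--     # Check if number is not
--     # divisible by 3
--     if (digitSum % 3 != 0):
--         return False
--
--     oddCount = 0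
--     for i in range(10) :
--         if (hash[i] % 2 != 0):
--             oddCount += 1
--
--     # If more than one digits have
--     # odd frequency, palindromic
--     # permutation not possible
--     if (oddCount > 1):
--         return False
--     else:
--         return True
-- ===== SOURCE B (Python) =====
-- def isDivisiblePalindrome(n):
--     # Collect the digits into a list, test the digit sum, then SORT the digits
--     # and greedily pair equal neighbours: each unpairable digit is one digit of
--     # odd multiplicity.  No frequency table of any kind is kept.
--     digits = []
--     while n:
--         digits.append(n % 10)
--         n //= 10
--     if sum(digits) % 3 != 0:
--         return False
--     digits.sort()
--     odd = 0
--     i = 0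
--     while i < len(digits):
--         if i + 1 < len(digits) and digits[i] == digits[i + 1]:
--             i += 2
--         else:
--             odd += 1
--             i += 1
--     return odd <= 1
-- ===== Notes on version B (the rewrite author's own statement) =====
-- stated objective: alternative
-- what changed: B keeps no frequency table at all: it collects the digits into a list, sorts it, and greedily pairs equal adjacent digits, counting the unpairable ones (= digits of odd multiplicity), instead of A's per-digit count array plus a separate odd-count scan over the counters.
import Mathlib
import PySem

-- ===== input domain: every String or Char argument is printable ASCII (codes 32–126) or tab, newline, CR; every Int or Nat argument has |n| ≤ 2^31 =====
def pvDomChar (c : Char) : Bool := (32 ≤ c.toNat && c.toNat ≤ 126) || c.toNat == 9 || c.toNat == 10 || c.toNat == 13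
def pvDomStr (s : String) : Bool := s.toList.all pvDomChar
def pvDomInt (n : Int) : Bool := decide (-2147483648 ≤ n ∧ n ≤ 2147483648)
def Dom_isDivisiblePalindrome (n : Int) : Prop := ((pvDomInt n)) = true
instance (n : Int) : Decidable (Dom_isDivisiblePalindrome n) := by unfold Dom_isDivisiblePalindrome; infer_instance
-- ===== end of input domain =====

-- B keeps A's digit-extraction loop but, instead of A's frequency array and its
-- odd-count scan over the counters, collects the digits into a list, sorts it and
-- greedily pairs equal neighbours, counting the unpairable digits (alternative).
-- (For n < 0 both Pythons' while loop never terminates; the ports agree on all Int.)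


-- ===== PORT A =====
-- A's while loop: on 0 ≤ n it runs over the nonnegative value, so it is transliterated
-- as structural recursion over n.toNat (for n < 0 the Python loop never terminates,
-- so no returned value is claimed there; both ports agree on all Int).
def isdpLoopA (m : Nat) (hash : List Int) (digitSum : Int) : List Int × Int :=
  if hm : m = 0 then (hash, digitSum)
  else isdpLoopA (m / 10) (hash.set (m % 10) (hash.getD (m % 10) 0 + 1))
        (digitSum + (m % 10 : Nat))
  termination_by m
  decreasing_by exact Nat.div_lt_self (Nat.pos_of_ne_zero hm) (by norm_num)

def isDivisiblePalindrome (n : Int) : Bool :=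
  let r := isdpLoopA n.toNat [0,0,0,0,0,0,0,0,0,0] 0
  if r.2 % 3 ≠ 0 then false
  else
    let oddCount : Int :=
      (List.range 10).foldl (fun c i => if r.1.getD i 0 % 2 ≠ 0 then c + 1 else c) 0
    if oddCount > 1 then false else true

-- ===== PORT B =====
-- the digits.append / n //= 10 loop of Source B
def isdpDigits (m : Nat) (acc : List Int) : List Int :=
  if hm : m = 0 then acc
  else isdpDigits (m / 10) (acc ++ [((m % 10 : Nat) : Int)])
  termination_by m
  decreasing_by exact Nat.div_lt_self (Nat.pos_of_ne_zero hm) (by norm_num)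

-- the greedy pairing index loop of Source B: i += 2 on an equal neighbour, else count 1
def isdpScan : List Int → Int
  | [] => 0
  | [_] => 1
  | x :: y :: t => if x = y then isdpScan t else 1 + isdpScan (y :: t)

def isDivisiblePalindrome_alt (n : Int) : Bool :=
  let digits := isdpDigits n.toNat []
  if digits.sum % 3 ≠ 0 then false
  else
    let sortedDigits := PySem.List.sorted digits (fun x => x) false
    decide (isdpScan sortedDigits ≤ 1)

-- ===== PRECONDITION & SPEC =====
def Spec_isDivisiblePalindrome (n : Int) (out : Bool) : Prop := out = isDivisiblePalindrome_alt n
instance (n : Int) (out : Bool) : Decidable (Spec_isDivisiblePalindrome n out) := by unfold Spec_isDivisiblePalindrome; infer_instance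

-- ===== CLAIM (what is proved, stated in full; the proofs are below) =====
def Claim_equal_isDivisiblePalindrome : Prop := ∀ (n : Int), Dom_isDivisiblePalindrome n → Spec_isDivisiblePalindrome n (isDivisiblePalindrome n)

-- ===== LEMMAS AND PROOFS =====

-- reference digit list (least significant first), the common yardstick of both ports
def pyDigits (m : Nat) : List Int :=
  if hm : m = 0 then [] else ((m % 10 : Nat) : Int) :: pyDigits (m / 10)
  termination_by m
  decreasing_by exact Nat.div_lt_self (Nat.pos_of_ne_zero hm) (by norm_num)

lemma pyDigits_mem (m : Nat) : ∀ x ∈ pyDigits m, 0 ≤ x ∧ x < 10 := by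
  induction m using Nat.strong_induction_on with
  | _ m ih =>
    intro x hx
    by_cases hm : m = 0
    · subst hm; rw [pyDigits] at hx; simp at hx
    · rw [pyDigits] at hx
      simp only [hm, dif_neg, not_false_iff, List.mem_cons] at hx
      rcases hx with h | h
      · subst h
        have : m % 10 < 10 := Nat.mod_lt _ (by norm_num)
        omega
      · exact ih (m / 10) (Nat.div_lt_self (Nat.pos_of_ne_zero hm) (by norm_num)) x h

-- A's loop: final digitSum is the digit sum, final counters are digit counts
lemma isdpLoopA_char (m : Nat) : ∀ hash digitSum, hash.length = 10 →
    (isdpLoopA m hash digitSum).2 = digitSum + (pyDigits m).sum ∧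
    ∀ i : Nat, (isdpLoopA m hash digitSum).1.getD i 0
      = hash.getD i 0 + ((pyDigits m).count (i : Int) : Int) := by
  induction m using Nat.strong_induction_on with
  | _ m ih =>
    intro hash digitSum hlen
    by_cases hm : m = 0
    · subst hm; rw [isdpLoopA, pyDigits]; simp
    · rw [isdpLoopA, pyDigits]
      simp only [hm, dif_neg, not_false_iff]
      have hd : m % 10 < 10 := Nat.mod_lt _ (by norm_num)
      obtain ⟨hsum, hcnt⟩ := ih (m / 10) (Nat.div_lt_self (Nat.pos_of_ne_zero hm) (by norm_num))
        (hash.set (m % 10) (hash.getD (m % 10) 0 + 1)) (digitSum + (m % 10 : Nat))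
        (by simp [hlen])
      refine ⟨by rw [hsum]; simp; ring, ?_⟩
      intro i
      rw [hcnt i]
      have hset : (hash.set (m % 10) (hash.getD (m % 10) 0 + 1)).getD i 0
          = hash.getD i 0 + (if i = m % 10 then 1 else 0) := by
        by_cases hi : i = m % 10
        · subst hi
          simp [List.getD, List.getElem?_set_self (by omega : m % 10 < hash.length)]
        · simp [List.getD, List.getElem?_set_ne (fun h => hi h.symm), hi]
      rw [hset, List.count_cons]
      by_cases hi : i = m % 10
      · subst hi
        simp
        push_cast
        ring
      · simp [hi]
        omega

-- B's digit loop builds exactly acc ++ pyDigits m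
lemma isdpDigits_eq (m : Nat) : ∀ acc, isdpDigits m acc = acc ++ pyDigits m := by
  induction m using Nat.strong_induction_on with
  | _ m ih =>
    intro acc
    by_cases hm : m = 0
    · subst hm; rw [isdpDigits, pyDigits]; simp
    · rw [isdpDigits, pyDigits]
      simp only [hm, dif_neg, not_false_iff]
      rw [ih (m / 10) (Nat.div_lt_self (Nat.pos_of_ne_zero hm) (by norm_num))]
      simp

-- counting a predicate that flips from false to true at exactly one list element
lemma countP_flip (p q : Nat → Bool) (k : Nat) : ∀ l : List Nat, l.Nodup → k ∈ l →
    (∀ i ∈ l, i ≠ k → p i = q i) → p k = true → q k = false →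
    l.countP p = l.countP q + 1 := by
  intro l
  induction l with
  | nil => intro _ hk; simp at hk
  | cons a t iht =>
    intro hnd ha heq hp hq
    have hnda := (List.nodup_cons.mp hnd).1
    by_cases hak : a = k
    · subst hak
      have hkt : a ∉ t := hnda
      have hcong : t.countP p = t.countP q := by
        apply List.countP_congr
        intro i hi
        rw [heq i (List.mem_cons_of_mem _ hi) (fun h => hkt (h ▸ hi))]
      simp [List.countP_cons, hp, hq, hcong]
    · have hkt : k ∈ t := by
        rcases List.mem_cons.mp ha with h | h
        · exact absurd h.symm hak
        · exact h
      have hpa : p a = q a := heq a (List.mem_cons_self) hak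
      have := iht (List.nodup_cons.mp hnd).2 hkt
        (fun i hi hik => heq i (List.mem_cons_of_mem _ hi) hik) hp hq
      simp only [List.countP_cons, this, hpa]
      cases q a <;> simp <;> omega

-- number of digit values (0..9) with odd multiplicity in a list
def oddValCount (l : List Int) : Nat :=
  (List.range 10).countP (fun (i : Nat) => l.count ((i : Int)) % 2 = 1)

lemma oddValCount_cons_notmem (x : Int) (t : List Int) (hx0 : 0 ≤ x) (hx10 : x < 10)
    (hxt : x ∉ t) : oddValCount (x :: t) = oddValCount t + 1 := by
  have hk : (x.toNat : Int) = x := Int.toNat_of_nonneg hx0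
  have ht0 : t.count x = 0 := List.count_eq_zero.mpr hxt
  unfold oddValCount
  apply countP_flip _ _ x.toNat (List.range 10) (List.nodup_range)
    (List.mem_range.mpr (by omega))
  · intro i _ hik
    have hix : (i : Int) ≠ x := by
      intro h; apply hik; omega
    simp [List.count_cons, hix, Ne.symm hix]
  · simp [hk, List.count_cons, ht0]
  · simp [hk, ht0]

lemma oddValCount_cons_cons (x : Int) (t : List Int) :
    oddValCount (x :: x :: t) = oddValCount t := by
  unfold oddValCount
  apply List.countP_congr
  intro i _
  by_cases hix : (i : Int) = x <;> simp [List.count_cons, hix] <;> omega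

-- the greedy pairing scan on a sorted list counts the values of odd multiplicity
lemma isdpScan_sorted (N : Nat) : ∀ l : List Int, l.length ≤ N → l.Pairwise (· ≤ ·) →
    (∀ x ∈ l, 0 ≤ x ∧ x < 10) → isdpScan l = (oddValCount l : Int) := by
  induction N with
  | zero =>
    intro l hlen _ _
    have : l = [] := List.eq_nil_of_length_eq_zero (by omega)
    subst this
    simp [isdpScan, oddValCount]
  | succ N ih =>
    intro l hlen hs hb
    rcases l with _ | ⟨x, _ | ⟨y, t⟩⟩
    · simp [isdpScan, oddValCount]
    · obtain ⟨hx0, hx10⟩ := hb x (List.mem_cons_self)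
      have h1 := oddValCount_cons_notmem x [] hx0 hx10 (by simp)
      have h0 : oddValCount ([] : List Int) = 0 := by decide
      rw [show isdpScan [x] = 1 from rfl, h1, h0]
      norm_num
    · obtain ⟨hx0, hx10⟩ := hb x (List.mem_cons_self)
      have hxy_le : x ≤ y := (List.pairwise_cons.mp hs).1 y (List.mem_cons_self)
      by_cases hxy : x = y
      · subst hxy
        have hst : t.Pairwise (· ≤ ·) :=
          (List.pairwise_cons.mp (List.pairwise_cons.mp hs).2).2
        have hres := ih t (by simp at hlen ⊢; omega) hst
          (fun z hz => hb z (List.mem_cons_of_mem _ (List.mem_cons_of_mem _ hz)))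
        simp [isdpScan, hres, oddValCount_cons_cons]
      · have hxlt : x < y := lt_of_le_of_ne hxy_le hxy
        have hsyt : (y :: t).Pairwise (· ≤ ·) := (List.pairwise_cons.mp hs).2
        have hxnot : x ∉ y :: t := by
          intro hmem
          rcases List.mem_cons.mp hmem with h | h
          · exact hxy h
          · have : y ≤ x := (List.pairwise_cons.mp hsyt).1 x h
            omega
        have hres := ih (y :: t) (by simp at hlen ⊢; omega) hsyt
          (fun z hz => hb z (List.mem_cons_of_mem _ hz))
        simp only [isdpScan, if_neg hxy, hres,
          oddValCount_cons_notmem x (y :: t) hx0 hx10 hxnot]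
        push_cast
        ring

lemma foldl_countP (p : Nat → Prop) [DecidablePred p] (l : List Nat) : ∀ c : Int,
    l.foldl (fun c i => if p i then c + 1 else c) c = c + (l.countP (fun i => decide (p i)) : Int) := by
  induction l with
  | nil => intro c; simp
  | cons x xs ih =>
    intro c
    simp only [List.foldl_cons, List.countP_cons, ih]
    by_cases h : p x <;> simp [h] <;> push_cast <;> ring

-- ===== VERDICT (by name: the statement is the Claim_ definition above) =====
theorem isDivisiblePalindrome_spec : Claim_equal_isDivisiblePalindrome := by
  intro n _
  unfold Spec_isDivisiblePalindrome isDivisiblePalindrome isDivisiblePalindrome_alt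
  have hdig : isdpDigits n.toNat [] = pyDigits n.toNat := by rw [isdpDigits_eq]; simp
  obtain ⟨hsum, hcnt⟩ := isdpLoopA_char n.toNat [0,0,0,0,0,0,0,0,0,0] 0 (by simp)
  set D := pyDigits n.toNat with hD
  set rA := isdpLoopA n.toNat [0,0,0,0,0,0,0,0,0,0] 0 with hrA
  have hinit : ∀ i : Nat, ([0,0,0,0,0,0,0,0,0,0] : List Int).getD i 0 = 0 := by
    intro i
    rcases Nat.lt_or_ge i 10 with h | h
    · interval_cases i <;> rfl
    · have hn : ([0,0,0,0,0,0,0,0,0,0] : List Int)[i]? = none :=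
        List.getElem?_eq_none (by simp; omega)
      simp [List.getD, hn]
  have hcnt' : ∀ i : Nat, rA.1.getD i 0 = (D.count (i : Int) : Int) := by
    intro i; rw [hcnt i, hinit i]; ring
  have hsum' : rA.2 = D.sum := by rw [hsum]; ring
  show (if rA.2 % 3 ≠ 0 then false
        else if (List.range 10).foldl
            (fun c i => if rA.1.getD i 0 % 2 ≠ 0 then c + 1 else c) (0:Int) > 1
          then false else true)
      = (if (isdpDigits n.toNat []).sum % 3 ≠ 0 then false
         else decide (isdpScan (PySem.List.sorted (isdpDigits n.toNat []) (fun x => x) false) ≤ 1))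
  rw [hdig, hsum']
  by_cases h3 : D.sum % 3 = 0
  · simp only [h3, ne_eq, not_true_eq_false, if_false]
    have hA : (List.range 10).foldl
        (fun c i => if rA.1.getD i 0 % 2 ≠ 0 then c + 1 else c) (0:Int)
        = (oddValCount D : Int) := by
      rw [foldl_countP (fun i => rA.1.getD i 0 % 2 ≠ 0)]
      simp only [zero_add]
      unfold oddValCount
      congr 1
      apply List.countP_congr
      intro i _
      rw [hcnt' i]
      constructor <;> intro hh <;> simp at hh ⊢ <;> omega
    have hperm : (PySem.List.sorted D (fun x => x) false).Perm D :=
      PySem.List.sorted_perm D (fun x => x) false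
    have hsorted : (PySem.List.sorted D (fun x => x) false).Pairwise (· ≤ ·) :=
      PySem.List.sorted_pairwise D (fun x => x)
    have hmem : ∀ x ∈ PySem.List.sorted D (fun x => x) false, 0 ≤ x ∧ x < 10 :=
      fun x hx => pyDigits_mem n.toNat x (hperm.mem_iff.mp hx)
    have hscan := isdpScan_sorted (PySem.List.sorted D (fun x => x) false).length
      (PySem.List.sorted D (fun x => x) false) le_rfl hsorted hmem
    have hoc : oddValCount (PySem.List.sorted D (fun x => x) false) = oddValCount D := by
      unfold oddValCount
      apply List.countP_congr
      intro i _
      rw [hperm.count_eq]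
    rw [hA, hscan, hoc]
    by_cases hc : (oddValCount D : Int) > 1 <;> simp [hc] <;> omega
  · simp [h3]
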